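-- pv_equiv track=rewrite | github.com/ssarangi/algorithms | hackerrank/greedy/priyanka_and_toys.py | min_units
-- ===== SOURCE A (Python) =====
-- def min_units(weights):
--     # diffs = [weights[i+1] - weights[i] for i in range(0, len(weights) - 1)]
--     weights = sorted(weights)
--
--     num_units = 1
--     last_bought = weights[0]
--     for w in weights:
--         if abs(w - last_bought) > 4:
--             last_bought = w
--             num_units += 1
--
--     return num_units
-- ===== SOURCE B (Python) =====
-- def min_units(weights):
--     remaining = list(weights)
--     count = 0
--     while remaining:
--         m = min(remaining)
--         remaining = [w for w in remaining if w > m + 4]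
--         count += 1
--     return count
-- ===== Notes on version B (the rewrite author's own statement) =====
-- stated objective: alternative
-- what changed: Drops the sort entirely: instead of sorting and scanning with a running last-bought value, B repeatedly takes the minimum of the remaining multiset and filters away every toy it covers (min-selection + filter instead of sort + linear scan).
import Mathlib
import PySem

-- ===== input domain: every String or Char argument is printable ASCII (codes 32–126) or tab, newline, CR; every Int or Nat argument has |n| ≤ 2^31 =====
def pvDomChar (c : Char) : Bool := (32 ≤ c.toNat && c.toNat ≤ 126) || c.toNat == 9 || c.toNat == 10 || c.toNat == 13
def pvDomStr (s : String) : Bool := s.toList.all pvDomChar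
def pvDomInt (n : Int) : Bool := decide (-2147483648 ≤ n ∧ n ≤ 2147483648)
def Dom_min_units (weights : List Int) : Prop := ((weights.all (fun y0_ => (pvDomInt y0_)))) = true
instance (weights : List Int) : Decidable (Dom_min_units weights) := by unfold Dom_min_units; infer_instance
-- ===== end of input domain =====

-- B drops A's sort entirely: it repeatedly takes the minimum of the remaining
-- multiset and filters away every toy within 4 of it (min-selection + filter
-- instead of sort + linear scan); same value on every nonempty list.

-- ===== PORT A =====
-- A: sort, then one pass carrying (num_units, last_bought); bump when |w - last| > 4.
def min_units (weights : List Int) : Int :=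
  let ws := PySem.List.sorted weights (fun x => x) false
  match PySem.List.pyGet? ws 0 with
  | none => 0   -- unreachable under Pre_: Python raises IndexError on []
  | some first =>
    (ws.foldl (fun (st : Int × Int) w =>
      if ((w - st.2).natAbs : Int) > 4 then (st.1 + 1, w) else st) (1, first)).1

-- ===== PORT B =====
-- min over a nonempty list is one of its elements (cited by pvBloop's termination proof)
theorem foldl_min_mem (t : List Int) (x : Int) : t.foldl min x ∈ x :: t := by
  induction t generalizing x with
  | nil => simp
  | cons y t' ih =>
    have := ih (min x y)
    rcases List.mem_cons.mp this with h | h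
    · rcases min_choice x y with hc | hc <;> rw [List.foldl_cons, h, hc] <;> simp
    · simp [List.foldl_cons, List.mem_cons.mpr (Or.inr (List.mem_cons_of_mem _ h))]

-- while remaining: m = min(remaining); remaining = [w for w in remaining if w > m+4]; count += 1
def pvBloop (count : Int) : List Int → Int
  | [] => count
  | x :: t =>
    let m := (PySem.List.min? (x :: t) (fun y => y)).getD 0   -- nonempty: getD default never used
    pvBloop (count + 1) ((x :: t).filter (fun w => decide (m + 4 < w)))
termination_by l => l.length
decreasing_by
  simp only [PySem.List.min?_id_cons, Option.getD_some]
  have hm := foldl_min_mem t x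
  calc (List.filter _ (x :: t)).length < (x :: t).length :=
        List.length_filter_lt_length_iff_exists.mpr ⟨_, hm, by simp⟩
    _ = t.length + 1 := by simp

def min_units_alt (weights : List Int) : Int := pvBloop 0 weights

-- ===== PRECONDITION & SPEC =====
-- Pre_ excludes only the empty list, on which A raises IndexError (weights[0]).
def Pre_min_units (weights : List Int) : Prop := weights ≠ []
instance (weights : List Int) : Decidable (Pre_min_units weights) := by unfold Pre_min_units; infer_instance
def pvWitness_min_units : List Int := [1, 7, 3]

def Spec_min_units (weights : List Int) (out : Int) : Prop := out = min_units_alt weights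
instance (weights : List Int) (out : Int) : Decidable (Spec_min_units weights out) := by unfold Spec_min_units; infer_instance

-- ===== CLAIM (what is proved, stated in full; the proofs are below) =====
def Claim_equal_min_units : Prop := ∀ (weights : List Int), Dom_min_units weights → Pre_min_units weights → Spec_min_units weights (min_units weights)

-- ===== LEMMAS AND PROOFS =====

-- min? (with the identity key) is characterised by membership + minimality, so its
-- value is invariant under permutation.
theorem min?_id_char (l : List Int) (m : Int) :
    PySem.List.min? l (fun x => x) = some m ↔ m ∈ l ∧ ∀ y ∈ l, m ≤ y := by
  constructor
  · intro h
    exact ⟨PySem.List.min?_mem h, fun y hy => PySem.List.min?_isMin h y hy⟩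
  · intro ⟨hmem, hmin⟩
    rcases hn : PySem.List.min? l (fun x => x) with _ | m'
    · rw [PySem.List.min?_eq_none_iff] at hn; simp [hn] at hmem
    · have h1 := PySem.List.min?_isMin hn m hmem
      have h2 := hmin m' (PySem.List.min?_mem hn)
      exact congrArg some (le_antisymm h1 h2)

theorem pvBloop_nil (c : Int) : pvBloop c [] = c := by rw [pvBloop.eq_def]

theorem pvBloop_eq_some (c : Int) (l : List Int) (m : Int)
    (h : PySem.List.min? l (fun y => y) = some m) :
    pvBloop c l = pvBloop (c + 1) (l.filter (fun w => decide (m + 4 < w))) := by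
  match l with
  | [] => simp [PySem.List.min?] at h
  | x :: t =>
    rw [pvBloop.eq_def]
    simp only [h, Option.getD_some]

-- pvBloop depends only on the multiset of remaining toys.
theorem pvBloop_perm (l l' : List Int) (c : Int) (hp : l.Perm l') :
    pvBloop c l = pvBloop c l' := by
  induction hn : l.length using Nat.strong_induction_on generalizing l l' c with
  | _ n ih =>
  rcases h : PySem.List.min? l (fun x => x) with _ | m
  · rw [PySem.List.min?_eq_none_iff] at h
    subst h
    rw [List.Perm.eq_nil hp.symm]
  · have h' : PySem.List.min? l' (fun x => x) = some m := by
      rw [min?_id_char] at h ⊢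
      exact ⟨hp.mem_iff.mp h.1, fun y hy => h.2 y (hp.mem_iff.mpr hy)⟩
    rw [pvBloop_eq_some _ _ _ h, pvBloop_eq_some _ _ _ h']
    subst hn
    exact ih _ (List.length_filter_lt_length_iff_exists.mpr
        ⟨m, PySem.List.min?_mem h, by simp⟩) _ _ _ (hp.filter _) rfl

-- inner skip of the dropWhile formulation, used to bridge A's fold and B's loop
def pvSkip (base : Int) : List Int → List Int :=
  List.dropWhile (fun x => decide (x - base ≤ 4))

def pvGroups : List Int → Int
  | [] => 0
  | w :: rest => 1 + pvGroups (pvSkip w rest)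
termination_by l => l.length
decreasing_by
  simp only [pvSkip]
  exact Nat.lt_succ_of_le (List.length_dropWhile_le _ _)

theorem pvGroups_nil : pvGroups [] = 0 := by simp [pvGroups]
theorem pvGroups_cons (w : Int) (rest : List Int) :
    pvGroups (w :: rest) = 1 + pvGroups (pvSkip w rest) := by simp [pvGroups]

-- A's loop equals the group count when the list is sorted and the carried base is ≤ all elements.
theorem loopA_eq_groups (l : List Int) (c base : Int)
    (hs : l.Pairwise (· ≤ ·)) (hb : ∀ x ∈ l, base ≤ x) :
    (l.foldl (fun (st : Int × Int) w =>
        if ((w - st.2).natAbs : Int) > 4 then (st.1 + 1, w) else st) (c, base)).1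
      = c + pvGroups (pvSkip base l) := by
  induction l generalizing c base with
  | nil => simp [pvSkip, pvGroups_nil]
  | cons w t ih =>
    have hbw : base ≤ w := hb w (List.mem_cons_self ..)
    have ht : t.Pairwise (· ≤ ·) := hs.of_cons
    by_cases h : w - base ≤ 4
    · have : ¬ (((w - base).natAbs : Int) > 4) := by omega
      simp only [List.foldl_cons, if_neg this]
      have : pvSkip base (w :: t) = pvSkip base t := by
        simp [pvSkip, List.dropWhile, h]
      rw [this]
      exact ih c base ht (fun x hx => hb x (List.mem_cons_of_mem _ hx))
    · have hgt : (((w - base).natAbs : Int) > 4) := by omega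
      simp only [List.foldl_cons, if_pos hgt]
      have hskip : pvSkip base (w :: t) = w :: t := by
        simp [pvSkip, List.dropWhile, h]
      rw [hskip, pvGroups_cons]
      have hw : ∀ x ∈ t, w ≤ x := fun x hx => (List.pairwise_cons.mp hs).1 x hx
      rw [ih (c + 1) w ht hw]
      ring

-- on a sorted list the filter of B's loop is the dropWhile of the group count
theorem filter_eq_dropWhile_sorted (b : Int) (l : List Int)
    (hs : l.Pairwise (· ≤ ·)) :
    l.filter (fun w => decide (b + 4 < w)) = pvSkip b l := by
  induction l with
  | nil => simp [pvSkip]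
  | cons w t ih =>
    by_cases h : w - b ≤ 4
    · have : pvSkip b (w :: t) = pvSkip b t := by
        simp [pvSkip, List.dropWhile, h]
      rw [this, ← ih hs.of_cons]
      simp [List.filter_cons]; omega
    · have hskip : pvSkip b (w :: t) = w :: t := by
        simp [pvSkip, List.dropWhile, h]
      rw [hskip]
      have : ∀ x ∈ w :: t, b + 4 < x := by
        intro x hx
        rcases List.mem_cons.mp hx with rfl | hx
        · omega
        · have := (List.pairwise_cons.mp hs).1 x hx; omega
      rw [List.filter_eq_self.mpr (fun x hx => by simp [this x hx])]

-- B's loop on a sorted list equals c + group count.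
theorem pvBloop_sorted (l : List Int) (c : Int) (hs : l.Pairwise (· ≤ ·)) :
    pvBloop c l = c + pvGroups l := by
  induction hn : l.length using Nat.strong_induction_on generalizing l c with
  | _ n ih =>
  match l with
  | [] => rw [pvBloop_nil]; simp [pvGroups_nil]
  | b :: rest =>
    have hmin : PySem.List.min? (b :: rest) (fun x => x) = some b := by
      rw [min?_id_char]
      exact ⟨List.mem_cons_self .., fun y hy => by
        rcases List.mem_cons.mp hy with rfl | hy
        · exact le_refl y
        · exact (List.pairwise_cons.mp hs).1 y hy⟩
    rw [pvBloop_eq_some _ _ _ hmin]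
    have hfl : (b :: rest).filter (fun w => decide (b + 4 < w)) = pvSkip b rest := by
      rw [filter_eq_dropWhile_sorted b _ hs]
      simp [pvSkip, List.dropWhile]
    rw [hfl, pvGroups_cons]
    have hlen : (pvSkip b rest).length < n := by
      subst hn
      simp only [pvSkip]
      exact Nat.lt_succ_of_le (List.length_dropWhile_le _ _)
    have hsk : (pvSkip b rest).Pairwise (· ≤ ·) :=
      (hs.of_cons.sublist (List.dropWhile_sublist _))
    rw [ih _ hlen _ _ hsk rfl]
    ring

-- ===== VERDICT =====
theorem min_units_spec : Claim_equal_min_units := by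
  intro weights _ hpre
  unfold Spec_min_units min_units min_units_alt
  rcases h : PySem.List.sorted weights (fun x => x) false with _ | ⟨b, rest⟩
  · exact absurd ((PySem.List.sorted_eq_nil_iff ..).mp h) hpre
  · have hget : PySem.List.pyGet? (b :: rest) 0 = some b := by
      simp [PySem.List.pyGet?, PySem.List.pyIdx?]
    show (match PySem.List.pyGet? (b :: rest) 0 with
      | none => (0 : Int)
      | some first => (List.foldl (fun (st : Int × Int) w =>
          if ((w - st.2).natAbs : Int) > 4 then (st.1 + 1, w) else st) (1, first) (b :: rest)).1)
        = pvBloop 0 weights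
    rw [hget]; dsimp only
    have hs : (b :: rest).Pairwise (· ≤ ·) := by
      have := PySem.List.sorted_pairwise (xs := weights) (key := fun x => x)
      rw [h] at this; exact this
    have hb : ∀ x ∈ (b :: rest), b ≤ x := by
      intro x hx
      rcases List.mem_cons.mp hx with rfl | hx
      · exact le_rfl
      · exact (List.pairwise_cons.mp hs).1 x hx
    rw [loopA_eq_groups (b :: rest) 1 b hs hb]
    have hperm : weights.Perm (b :: rest) := by
      have := PySem.List.sorted_perm (xs := weights) (key := fun x => x) (rev := false)
      rw [h] at this; exact this.symm
    rw [pvBloop_perm weights (b :: rest) 0 hperm, pvBloop_sorted _ _ hs, pvGroups_cons]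
    have : pvSkip b (b :: rest) = pvSkip b rest := by
      simp [pvSkip, List.dropWhile]
    rw [this]
    ring
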